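-- pv_equiv track=rewrite | github.com/isorabins/wingman | src/cache_middleware.py | _path_matches_pattern
-- ===== SOURCE A (Python) =====
-- def _path_matches_pattern(path: str, pattern: str) -> bool:
--     """
--     Check if a path matches a cache pattern.
--
--     Supports basic path parameter matching like /api/user/{user_id}/data
--     """
--     # For now, simple prefix matching
--     # Could be enhanced with regex patterns if needed
--     if pattern.endswith("*"):
--         return path.startswith(pattern[:-1])
--
--     # Check for path parameters
--     if "{" in pattern and "}" in pattern:
--         pattern_parts = pattern.split("/")
--         path_parts = path.split("/")
--
--         if len(pattern_parts) != len(path_parts):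
--             return False
--
--         for pattern_part, path_part in zip(pattern_parts, path_parts):
--             if pattern_part.startswith("{") and pattern_part.endswith("}"):
--                 continue  # Parameter match
--             elif pattern_part != path_part:
--                 return False
--
--         return True
--
--     return path == pattern
-- ===== SOURCE B (Python) =====
-- def _path_matches_pattern(path: str, pattern: str) -> bool:
--     if pattern.endswith("*"):
--         return path.startswith(pattern[:-1])
--     if "{" in pattern and "}" in pattern:
--         return _segments_match(path, pattern)
--     return path == pattern
--
--
-- def _segments_match(path: str, pattern: str) -> bool:
--     """Compare one leading segment at a time, never materializing the split lists."""
--     pseg, psep, prest = path.partition("/")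
--     qseg, qsep, qrest = pattern.partition("/")
--     if not (qseg.startswith("{") and qseg.endswith("}")) and pseg != qseg:
--         return False
--     if psep != qsep:
--         return False
--     return (not psep) or _segments_match(prest, qrest)
-- ===== Notes on version B (the rewrite author's own statement) =====
-- stated objective: alternative
-- what changed: The parameter-pattern branch no longer splits both strings into lists and zips them with a length check: B recursively peels one '/'-delimited segment at a time from both strings with str.partition, comparing as it goes, so no segment lists are ever built.
import Mathlib
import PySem

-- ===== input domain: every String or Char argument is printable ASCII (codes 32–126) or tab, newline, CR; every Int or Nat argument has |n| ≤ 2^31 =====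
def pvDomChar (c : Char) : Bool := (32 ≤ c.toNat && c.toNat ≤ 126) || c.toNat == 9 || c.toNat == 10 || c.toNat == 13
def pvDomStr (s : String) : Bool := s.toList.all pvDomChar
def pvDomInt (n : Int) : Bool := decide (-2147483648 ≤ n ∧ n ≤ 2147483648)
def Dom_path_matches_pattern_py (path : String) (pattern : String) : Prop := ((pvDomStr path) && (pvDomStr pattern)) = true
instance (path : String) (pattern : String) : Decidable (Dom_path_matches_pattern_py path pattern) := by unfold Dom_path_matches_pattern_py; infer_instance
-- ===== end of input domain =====

-- B replaces the split-both-strings-and-zip loop of the '{param}' branch by a recursive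
-- one-segment-at-a-time scan (str.partition) that never builds the segment lists; same values everywhere.

-- ===== PORT A =====
-- the `for pattern_part, path_part in zip(...)` loop with its continue / return False / final return True
def pvLoopA : List (List Char × List Char) → Bool
  | [] => true
  | (pattern_part, path_part) :: rest =>
    if PySem.Chars.startswith pattern_part ['{'] && PySem.Chars.endswith pattern_part ['}'] then
      pvLoopA rest  -- continue: parameter match
    else if pattern_part ≠ path_part then false
    else pvLoopA rest

def path_matches_pattern_py (path : String) (pattern : String) : Bool :=
  if PySem.Str.endswith pattern "*" then
    PySem.Str.startswith path (PySem.Str.slice pattern none (some (-1)))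
  else if PySem.Str.isIn "{" pattern && PySem.Str.isIn "}" pattern then
    let pattern_parts := PySem.Chars.splitOn pattern.toList ['/']
    let path_parts := PySem.Chars.splitOn path.toList ['/']
    if pattern_parts.length ≠ path_parts.length then false
    else pvLoopA (pattern_parts.zip path_parts)
  else path == pattern

-- ===== PORT B =====
-- _segments_match: path.partition("/") is takeWhile/dropWhile at the first '/';
-- psep == qsep becomes matching on the two dropWhile results (both empty / both start with '/').
def pvSegmentsMatch : List Char → List Char → Bool
  | path, pattern =>
    let pseg := path.takeWhile (· ≠ '/')
    let qseg := pattern.takeWhile (· ≠ '/')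
    if !(PySem.Chars.startswith qseg ['{'] && PySem.Chars.endswith qseg ['}']) && pseg ≠ qseg then
      false
    else
      match hp : path.dropWhile (· ≠ '/'), hq : pattern.dropWhile (· ≠ '/') with
      | [], [] => true
      | _ :: prest, _ :: qrest => pvSegmentsMatch prest qrest
      | _, _ => false
  termination_by path _ => path.length
  decreasing_by
    have := List.length_dropWhile_le (· ≠ '/') path
    rw [hp] at this; simp at this; omega

def path_matches_pattern_py_alt (path : String) (pattern : String) : Bool :=
  if PySem.Str.endswith pattern "*" then
    PySem.Str.startswith path (PySem.Str.slice pattern none (some (-1)))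
  else if PySem.Str.isIn "{" pattern && PySem.Str.isIn "}" pattern then
    pvSegmentsMatch path.toList pattern.toList
  else path == pattern

-- ===== PRECONDITION & SPEC =====
def Spec_path_matches_pattern_py (path : String) (pattern : String) (out : Bool) : Prop := out = path_matches_pattern_py_alt path pattern
instance (path : String) (pattern : String) (out : Bool) : Decidable (Spec_path_matches_pattern_py path pattern out) := by unfold Spec_path_matches_pattern_py; infer_instance

-- ===== CLAIM (what is proved, stated in full; the proofs are below) =====
def Claim_equal_path_matches_pattern_py : Prop := ∀ (path : String) (pattern : String), Dom_path_matches_pattern_py path pattern → Spec_path_matches_pattern_py path pattern (path_matches_pattern_py path pattern)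

-- ===== LEMMAS AND PROOFS =====

-- the list of '/'-separated segments, defined the way pvSegmentsMatch walks them
def pvSegs : List Char → List (List Char)
  | l =>
    match hd : l.dropWhile (· ≠ '/') with
    | [] => [l.takeWhile (· ≠ '/')]
    | _ :: r => l.takeWhile (· ≠ '/') :: pvSegs r
  termination_by l => l.length
  decreasing_by
    have := List.length_dropWhile_le (· ≠ '/') l
    rw [hd] at this; simp at this; omega

theorem pvSegs_of_drop_nil (l : List Char) (h : l.dropWhile (· ≠ '/') = []) :
    pvSegs l = [l.takeWhile (· ≠ '/')] := by
  rw [pvSegs]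
  split
  · rfl
  · rename_i a r heq; rw [h] at heq; cases heq

theorem pvSegs_of_drop_cons (l : List Char) (a : Char) (r : List Char)
    (h : l.dropWhile (· ≠ '/') = a :: r) :
    pvSegs l = l.takeWhile (· ≠ '/') :: pvSegs r := by
  rw [pvSegs]
  split
  · rename_i heq; rw [h] at heq; cases heq
  · rename_i a' r' heq; rw [h] at heq; cases heq; rfl

theorem pvSegs_eq_cons (l : List Char) : ∃ t, pvSegs l = l.takeWhile (· ≠ '/') :: t := by
  cases hd : l.dropWhile (· ≠ '/') with
  | nil => exact ⟨[], pvSegs_of_drop_nil l hd⟩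
  | cons a r => exact ⟨pvSegs r, pvSegs_of_drop_cons l a r hd⟩

theorem pvSegs_ne_nil (l : List Char) : pvSegs l ≠ [] := by
  obtain ⟨t, ht⟩ := pvSegs_eq_cons l
  simp [ht]

-- prepend onto the first segment
def pvConsHead (x : List Char) : List (List Char) → List (List Char)
  | [] => [x]
  | h :: t => (x ++ h) :: t

theorem pvConsHead_nil (ys : List (List Char)) (h : ys ≠ []) : pvConsHead [] ys = ys := by
  cases ys with
  | nil => exact absurd rfl h
  | cons a t => simp [pvConsHead]

theorem pvConsHead_append (x : List Char) (c : Char) (ys : List (List Char)) :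
    pvConsHead (x ++ [c]) ys = pvConsHead x (pvConsHead [c] ys) := by
  cases ys <;> simp [pvConsHead]

theorem pvSegs_cons_slash (rest : List Char) : pvSegs ('/' :: rest) = [] :: pvSegs rest := by
  have hd : ('/' :: rest).dropWhile (· ≠ '/') = '/' :: rest := by simp
  rw [pvSegs_of_drop_cons _ '/' rest hd]
  simp

theorem pvSegs_cons_ne (c : Char) (rest : List Char) (hc : c ≠ '/') :
    pvSegs (c :: rest) = pvConsHead [c] (pvSegs rest) := by
  have hdw : (c :: rest).dropWhile (· ≠ '/') = rest.dropWhile (· ≠ '/') := by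
    simp [hc]
  have htw : (c :: rest).takeWhile (· ≠ '/') = c :: rest.takeWhile (· ≠ '/') := by
    simp [hc]
  cases hd : rest.dropWhile (· ≠ '/') with
  | nil =>
    rw [pvSegs_of_drop_nil _ (hdw.trans hd), pvSegs_of_drop_nil _ hd, htw]
    simp [pvConsHead]
  | cons a r =>
    rw [pvSegs_of_drop_cons _ a r (hdw.trans hd), pvSegs_of_drop_cons _ a r hd, htw]
    simp [pvConsHead]

theorem pvGo_eq (l : List Char) : ∀ (fuel : Nat) (cur : List Char) (acc : List (List Char)),
    l.length ≤ fuel →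
    PySem.Chars.splitOn.go ['/'] fuel l cur acc = acc.reverse ++ pvConsHead cur.reverse (pvSegs l) := by
  induction l with
  | nil =>
    intro fuel cur acc _
    rw [pvSegs_of_drop_nil [] rfl]
    cases fuel <;> (rw [PySem.Chars.splitOn.go] <;> simp [pvConsHead])
  | cons c rest ih =>
    intro fuel cur acc hf
    cases fuel with
    | zero => simp at hf
    | succ f =>
      rw [PySem.Chars.splitOn.go]
      by_cases hc : c = '/'
      · subst hc
        have hpre : List.isPrefixOf ['/'] ('/' :: rest) = true := by simp [List.isPrefixOf]
        simp only [hpre, if_true]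
        have hdrop : List.drop (['/'] : List Char).length ('/' :: rest) = rest := by simp
        rw [hdrop, ih f [] (cur.reverse :: acc) (by simp at hf; omega)]
        simp only [List.reverse_nil]
        rw [pvSegs_cons_slash, pvConsHead_nil _ (pvSegs_ne_nil rest)]
        simp [pvConsHead]
      · have hpre : List.isPrefixOf ['/'] (c :: rest) = false := by
          simp [List.isPrefixOf]; intro h; exact absurd h.symm hc
        simp only [hpre, Bool.false_eq_true, if_false]
        rw [ih f (c :: cur) acc (by simp at hf; omega)]
        rw [pvSegs_cons_ne c rest hc]
        have : (c :: cur).reverse = cur.reverse ++ [c] := by simp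
        rw [this, pvConsHead_append]

theorem pvSplitOn_eq_segs (s : List Char) : PySem.Chars.splitOn s ['/'] = pvSegs s := by
  show PySem.Chars.splitOn.go ['/'] (s.length + 1) s [] [] = pvSegs s
  rw [pvGo_eq s (s.length + 1) [] [] (by omega)]
  simp [pvConsHead_nil _ (pvSegs_ne_nil s)]

-- unfolding pvSegmentsMatch once, per shape of the two dropWhile results
theorem pvSM_nil_nil (path pattern : List Char) (hp : path.dropWhile (· ≠ '/') = [])
    (hq : pattern.dropWhile (· ≠ '/') = []) :
    pvSegmentsMatch path pattern =
      (if !(PySem.Chars.startswith (pattern.takeWhile (· ≠ '/')) ['{'] &&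
            PySem.Chars.endswith (pattern.takeWhile (· ≠ '/')) ['}']) &&
          path.takeWhile (· ≠ '/') ≠ pattern.takeWhile (· ≠ '/') then false else true) := by
  rw [pvSegmentsMatch]
  congr 1
  split
  · rfl
  · next x prest y qrest heqp heqq => rw [hp] at heqp; cases heqp
  · next hno1 hno2 => exact (hno1 hp hq).elim

theorem pvSM_cons_cons (path pattern : List Char) (a b : Char) (prest qrest : List Char)
    (hp : path.dropWhile (· ≠ '/') = a :: prest) (hq : pattern.dropWhile (· ≠ '/') = b :: qrest) :
    pvSegmentsMatch path pattern =
      (if !(PySem.Chars.startswith (pattern.takeWhile (· ≠ '/')) ['{'] &&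
            PySem.Chars.endswith (pattern.takeWhile (· ≠ '/')) ['}']) &&
          path.takeWhile (· ≠ '/') ≠ pattern.takeWhile (· ≠ '/') then false
       else pvSegmentsMatch prest qrest) := by
  rw [pvSegmentsMatch]
  congr 1
  split
  · next heqp heqq => rw [hp] at heqp; cases heqp
  · next x pr y qr heqp heqq =>
      rw [hp] at heqp; rw [hq] at heqq; cases heqp; cases heqq; rfl
  · next hno1 hno2 => exact (hno2 a prest b qrest hp hq).elim

theorem pvSM_nil_cons (path pattern : List Char) (b : Char) (qrest : List Char)
    (hp : path.dropWhile (· ≠ '/') = []) (hq : pattern.dropWhile (· ≠ '/') = b :: qrest) :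
    pvSegmentsMatch path pattern =
      (if !(PySem.Chars.startswith (pattern.takeWhile (· ≠ '/')) ['{'] &&
            PySem.Chars.endswith (pattern.takeWhile (· ≠ '/')) ['}']) &&
          path.takeWhile (· ≠ '/') ≠ pattern.takeWhile (· ≠ '/') then false else false) := by
  rw [pvSegmentsMatch]
  congr 1
  split
  · next heqp heqq => rw [hq] at heqq; cases heqq
  · next x pr y qr heqp heqq => rw [hp] at heqp; cases heqp
  · rfl

theorem pvSM_cons_nil (path pattern : List Char) (a : Char) (prest : List Char)
    (hp : path.dropWhile (· ≠ '/') = a :: prest) (hq : pattern.dropWhile (· ≠ '/') = []) :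
    pvSegmentsMatch path pattern =
      (if !(PySem.Chars.startswith (pattern.takeWhile (· ≠ '/')) ['{'] &&
            PySem.Chars.endswith (pattern.takeWhile (· ≠ '/')) ['}']) &&
          path.takeWhile (· ≠ '/') ≠ pattern.takeWhile (· ≠ '/') then false else false) := by
  rw [pvSegmentsMatch]
  congr 1
  split
  · next heqp heqq => rw [hp] at heqp; cases heqp
  · next x pr y qr heqp heqq => rw [hq] at heqq; cases heqq
  · rfl

-- the head comparison of B's scan against the head step of A's loop (lengths condition c abstract)
theorem pvChain1 (pseg qseg : List Char) (c : Prop) [Decidable c] (hc : ¬ c) :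
    (if !(PySem.Chars.startswith qseg ['{'] && PySem.Chars.endswith qseg ['}']) && pseg ≠ qseg
     then false else true) =
    (if c then false
     else if PySem.Chars.startswith qseg ['{'] && PySem.Chars.endswith qseg ['}'] then true
     else if qseg ≠ pseg then false else true) := by
  rw [if_neg hc]
  cases hparam : PySem.Chars.startswith qseg ['{'] && PySem.Chars.endswith qseg ['}'] <;>
    by_cases he : pseg = qseg
  · simp [hparam, he]
  · simp [hparam, he, Ne.symm he]
  · simp [hparam, he]
  · simp [hparam, he, Ne.symm he]

theorem pvChain (pseg qseg : List Char) (L : Bool) (c : Prop) [Decidable c] :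
    (if !(PySem.Chars.startswith qseg ['{'] && PySem.Chars.endswith qseg ['}']) && pseg ≠ qseg
     then false else if c then false else L) =
    (if c then false
     else if PySem.Chars.startswith qseg ['{'] && PySem.Chars.endswith qseg ['}'] then L
     else if qseg ≠ pseg then false else L) := by
  cases hparam : PySem.Chars.startswith qseg ['{'] && PySem.Chars.endswith qseg ['}'] <;>
    by_cases he : pseg = qseg
  · simp [hparam, he]
  · simp [hparam, he, Ne.symm he]
  · simp [hparam, he]
  · simp [hparam, he, Ne.symm he]

-- the crux: the one-segment-at-a-time scan equals A's length-check + zip loop over the split lists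
theorem pvSegmentsMatch_eq_aux (n : Nat) : ∀ (path pattern : List Char), path.length ≤ n →
    pvSegmentsMatch path pattern =
      (if (pvSegs pattern).length ≠ (pvSegs path).length then false
       else pvLoopA ((pvSegs pattern).zip (pvSegs path))) := by
  induction n with
  | zero =>
    intro path pattern hn
    have hpath : path = [] := by cases path <;> simp_all
    subst hpath
    cases hq : pattern.dropWhile (· ≠ '/') with
    | nil =>
      rw [pvSM_nil_nil [] pattern rfl hq, pvSegs_of_drop_nil [] rfl, pvSegs_of_drop_nil pattern hq]
      have hz : ([pattern.takeWhile (· ≠ '/')].zip [List.takeWhile (· ≠ '/') []]) =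
          [(pattern.takeWhile (· ≠ '/'), List.takeWhile (· ≠ '/') [])] := rfl
      rw [hz]
      simp only [pvLoopA]
      exact pvChain1 (List.takeWhile (· ≠ '/') []) (pattern.takeWhile (· ≠ '/')) _ (by simp)
    | cons b qrest =>
      rw [pvSM_nil_cons [] pattern b qrest rfl hq, pvSegs_of_drop_nil [] rfl,
        pvSegs_of_drop_cons pattern b qrest hq]
      have hpos := List.length_pos_iff.mpr (pvSegs_ne_nil qrest)
      split_ifs <;>
        first
          | rfl
          | (exfalso; rename_i h; simp only [List.length_cons, ne_eq, not_not,
              List.length_nil] at h; omega)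
  | succ n ih =>
    intro path pattern hn
    cases hp : path.dropWhile (· ≠ '/') with
    | nil =>
      cases hq : pattern.dropWhile (· ≠ '/') with
      | nil =>
        rw [pvSM_nil_nil path pattern hp hq, pvSegs_of_drop_nil path hp,
          pvSegs_of_drop_nil pattern hq]
        have hz : ([pattern.takeWhile (· ≠ '/')].zip [path.takeWhile (· ≠ '/')]) =
            [(pattern.takeWhile (· ≠ '/'), path.takeWhile (· ≠ '/'))] := rfl
        rw [hz]
        simp only [pvLoopA]
        exact pvChain1 (path.takeWhile (· ≠ '/')) (pattern.takeWhile (· ≠ '/')) _ (by simp)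
      | cons b qrest =>
        rw [pvSM_nil_cons path pattern b qrest hp hq, pvSegs_of_drop_nil path hp,
          pvSegs_of_drop_cons pattern b qrest hq]
        have hpos := List.length_pos_iff.mpr (pvSegs_ne_nil qrest)
        split_ifs <;>
          first
            | rfl
            | (exfalso; rename_i h; simp only [List.length_cons, ne_eq, not_not,
                List.length_nil] at h; omega)
    | cons a prest =>
      have hpr : prest.length ≤ n := by
        have := List.length_dropWhile_le (· ≠ '/') path
        rw [hp] at this; simp at this; omega
      cases hq : pattern.dropWhile (· ≠ '/') with
      | nil =>
        rw [pvSM_cons_nil path pattern a prest hp hq, pvSegs_of_drop_cons path a prest hp,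
          pvSegs_of_drop_nil pattern hq]
        have hpos := List.length_pos_iff.mpr (pvSegs_ne_nil prest)
        split_ifs <;>
          first
            | rfl
            | (exfalso; rename_i h; simp only [List.length_cons, ne_eq, not_not,
                List.length_nil] at h; omega)
      | cons b qrest =>
        rw [pvSM_cons_cons path pattern a b prest qrest hp hq, ih prest qrest hpr,
          pvSegs_of_drop_cons path a prest hp, pvSegs_of_drop_cons pattern b qrest hq]
        have hz : ((pattern.takeWhile (· ≠ '/') :: pvSegs qrest).zip
            (path.takeWhile (· ≠ '/') :: pvSegs prest)) =
            (pattern.takeWhile (· ≠ '/'), path.takeWhile (· ≠ '/')) ::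
              (pvSegs qrest).zip (pvSegs prest) := rfl
        rw [hz]
        simp only [pvLoopA]
        have hiff : ((pattern.takeWhile (· ≠ '/') :: pvSegs qrest).length ≠
            (path.takeWhile (· ≠ '/') :: pvSegs prest).length) ↔
            ((pvSegs qrest).length ≠ (pvSegs prest).length) := by simp
        rw [if_congr hiff rfl rfl]
        exact pvChain (path.takeWhile (· ≠ '/')) (pattern.takeWhile (· ≠ '/'))
          (pvLoopA ((pvSegs qrest).zip (pvSegs prest))) _

theorem pvSegmentsMatch_eq (path pattern : List Char) :
    pvSegmentsMatch path pattern =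
      (if (pvSegs pattern).length ≠ (pvSegs path).length then false
       else pvLoopA ((pvSegs pattern).zip (pvSegs path))) :=
  pvSegmentsMatch_eq_aux path.length path pattern (le_refl _)

-- ===== VERDICT (by name: the statement is the Claim_ definition above) =====
theorem path_matches_pattern_py_spec : Claim_equal_path_matches_pattern_py := by
  intro path pattern _
  unfold Spec_path_matches_pattern_py path_matches_pattern_py path_matches_pattern_py_alt
  split_ifs with h1 h2
  · rfl
  · rw [pvSplitOn_eq_segs, pvSplitOn_eq_segs, pvSegmentsMatch_eq]
  · rfl
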